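-- pv_equiv track=rewrite | github.com/klusik/Python | 015 -- Collatz/klusik_collatz.py | collatz_sequences
-- ===== SOURCE A (Python) =====
-- def collatz_sequences(max_number):
--     # Cache complete suffixes for starting values within the requested range.
--     # This avoids recomputing shared tails while keeping cache growth bounded.
--     cache = {1: (1,)}
--
--     for start in range(1, max_number + 1):
--         if start == 1:
--             yield start, (1, 4, 2, 1)
--             continue
--
--         current = start
--         path = []
--         cached_tail = None
--
--         while cached_tail is None:
--             cached_tail = cache.get(current)
--             if cached_tail is not None:
--                 break
--
--             path.append(current)
--             if current & 1:
--                 current = (current * 3) + 1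
--             else:
--                 current >>= 1
--
--         sequence = tuple(path) + cached_tail
--
--         # Populate cache only for values inside the requested range.
--         for index, value in enumerate(path):
--             if value <= max_number and value not in cache:
--                 cache[value] = sequence[index:]
--
--         yield start, sequence
-- ===== SOURCE B (Python) =====
-- def collatz_sequences(max_number):
--     # No memoization: each sequence is computed independently by direct iteration.
--     # start == 1 keeps A's documented special case (1, 4, 2, 1).
--     for start in range(1, max_number + 1):
--         if start == 1:
--             yield 1, (1, 4, 2, 1)
--             continue
--         current = start
--         path = []
--         while current != 1:
--             path.append(current)
--             current = current * 3 + 1 if current & 1 else current >> 1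
--         path.append(1)
--         yield start, tuple(path)
-- ===== Notes on version B (the rewrite author's own statement) =====
-- stated objective: simpler
-- what changed: Drops A's suffix-memoization cache entirely: each start's sequence is computed independently by iterating the Collatz step until reaching 1.
import Mathlib
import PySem

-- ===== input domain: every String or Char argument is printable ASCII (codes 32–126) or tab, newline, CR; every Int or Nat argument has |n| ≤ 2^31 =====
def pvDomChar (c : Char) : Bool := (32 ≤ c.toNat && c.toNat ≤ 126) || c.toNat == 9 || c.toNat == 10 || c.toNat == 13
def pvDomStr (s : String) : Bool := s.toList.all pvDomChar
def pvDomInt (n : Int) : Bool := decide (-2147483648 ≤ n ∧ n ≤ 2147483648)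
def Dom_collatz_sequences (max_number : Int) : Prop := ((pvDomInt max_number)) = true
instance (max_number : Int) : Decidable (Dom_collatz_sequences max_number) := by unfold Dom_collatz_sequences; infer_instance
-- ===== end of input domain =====

-- B drops A's suffix-memoization cache and computes each sequence independently (objective: simpler).
-- Both Pythons are generators; equivalence is about the yielded list of (start, sequence) pairs.
-- The Nat fuel (and the `.take pvFuel` on A's yielded sequence) only encodes the hypothetical
-- non-terminating Collatz runs Python would loop forever on; it never fires on a terminating run.

def pvFuel : Nat := 1000000000

-- shared by both ports: one Collatz step ('(current * 3) + 1 if current & 1 else current >> 1')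
def pvStep (current : Int) : Int :=
  if PySem.Int.band current 1 ≠ 0 then current * 3 + 1 else current >>> 1

-- ===== PORT A =====
-- the 'while cached_tail is None' loop: returns (path, some tail) on cache hit, (path, none) on fuel exhaustion
def pvALoop (cache : PySem.Dict Int (List Int)) : Int → List Int → Nat → List Int × Option (List Int)
  | _, path, 0 => (path, none)
  | current, path, fuel+1 =>
    match PySem.Dict.get? cache current with
    | some tail => (path, some tail)
    | none => pvALoop cache (pvStep current) (path ++ [current]) fuel

-- the 'for index, value in enumerate(path)' cache-population loop
def pvACacheUpd (max_number : Int) (seq : List Int) (cache : PySem.Dict Int (List Int))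
    (path : List Int) : PySem.Dict Int (List Int) :=
  (PySem.List.enumerate path).foldl
    (fun c p =>
      if p.2 ≤ max_number ∧ PySem.Dict.contains c p.2 = false
      then PySem.Dict.insert c p.2 (PySem.List.slice seq (some p.1) none)
      else c)
    cache

def pvABody (max_number : Int) (st : PySem.Dict Int (List Int) × List (Int × List Int))
    (start : Int) : PySem.Dict Int (List Int) × List (Int × List Int) :=
  if start = 1 then (st.1, st.2 ++ [(start, [1, 4, 2, 1])])
  else
    match pvALoop st.1 start [] pvFuel with
    | (path, some tail) =>
        (pvACacheUpd max_number (path ++ tail) st.1 path,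
         st.2 ++ [(start, (path ++ tail).take pvFuel)])
    | (path, none) => (st.1, st.2 ++ [(start, path)])   -- fuel exhausted: Python would not terminate

def collatz_sequences (max_number : Int) : List (Int × List Int) :=
  ((PySem.List.pyRange 1 (max_number + 1) 1).foldl (pvABody max_number)
    (PySem.Dict.insert PySem.Dict.empty 1 [1], [])).2

-- ===== PORT B =====
-- the plain 'while current != 1' loop of Source B (fuel = totality guard only)
def pvBLoop : Int → List Int → Nat → List Int
  | _, path, 0 => path
  | current, path, fuel+1 =>
    if current = 1 then path ++ [1]
    else pvBLoop (pvStep current) (path ++ [current]) fuel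

def collatz_sequences_alt (max_number : Int) : List (Int × List Int) :=
  (PySem.List.pyRange 1 (max_number + 1) 1).map
    (fun start => if start = 1 then (1, [1, 4, 2, 1]) else (start, pvBLoop start [] pvFuel))

-- ===== PRECONDITION & SPEC =====
def Spec_collatz_sequences (max_number : Int) (out : List (Int × List Int)) : Prop := out = collatz_sequences_alt max_number
instance (max_number : Int) (out : List (Int × List Int)) : Decidable (Spec_collatz_sequences max_number out) := by unfold Spec_collatz_sequences; infer_instance

-- ===== CLAIM (what is proved, stated in full; the proofs are below) =====
def Claim_equal_collatz_sequences : Prop := ∀ (max_number : Int), Dom_collatz_sequences max_number → Spec_collatz_sequences max_number (collatz_sequences max_number)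

-- ===== LEMMAS AND PROOFS =====

-- 'PvChain v l' : l is THE Collatz sequence from v, ending at the first 1
inductive PvChain : Int → List Int → Prop
  | one : PvChain 1 [1]
  | cons {v : Int} {l : List Int} : v ≠ 1 → PvChain (pvStep v) l → PvChain v (v :: l)

-- invariant of A's cache: 1 is always a key, and every stored tail is a genuine Collatz chain
def PvInv (cache : PySem.Dict Int (List Int)) : Prop :=
  (PySem.Dict.get? cache 1).isSome = true ∧
  ∀ v l, PySem.Dict.get? cache v = some l → PvChain v l

-- the chain, truncated by remaining fuel, is exactly what B's loop produces
lemma pvChainTake {v : Int} {l : List Int} (h : PvChain v l) :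
    ∀ (fuel : Nat) (acc : List Int),
      (acc ++ l).take (acc.length + fuel) = pvBLoop v acc fuel := by
  induction h with
  | one =>
    intro fuel acc
    cases fuel with
    | zero => simp [pvBLoop]
    | succ f =>
      rw [show pvBLoop 1 acc (f + 1) = acc ++ [1] from by simp [pvBLoop]]
      exact List.take_of_length_le (by simp)
  | @cons v l hne _ ih =>
    intro fuel acc
    cases fuel with
    | zero => simp [pvBLoop]
    | succ f =>
      simp only [pvBLoop, if_neg hne]
      have := ih f (acc ++ [v])
      rw [show acc ++ v :: l = (acc ++ [v]) ++ l by simp,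
          show acc.length + (f + 1) = (acc ++ [v]).length + f by simp; omega]
      exact this

-- A's loop (with its fuel-truncation convention) computes exactly B's loop
lemma pvEqLoop {cache : PySem.Dict Int (List Int)} (hInv : PvInv cache) :
    ∀ (fuel : Nat) (current : Int) (acc : List Int),
      (match pvALoop cache current acc fuel with
       | (p, some t) => (p ++ t).take (acc.length + fuel)
       | (p, none) => p) = pvBLoop current acc fuel := by
  intro fuel
  induction fuel with
  | zero => intro current acc; simp [pvALoop, pvBLoop]
  | succ f ih =>
    intro current acc
    cases hg : PySem.Dict.get? cache current with
    | some tail =>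
      simp only [pvALoop, hg]
      exact pvChainTake (hInv.2 _ _ hg) (f + 1) acc
    | none =>
      have hne : current ≠ 1 := by
        intro h; subst h
        have h1 := hInv.1
        rw [hg] at h1
        simp at h1
      simp only [pvALoop, hg, pvBLoop, if_neg hne]
      have := ih (pvStep current) (acc ++ [current])
      rw [show acc.length + (f + 1) = (acc ++ [current]).length + f by simp; omega]
      exact this

-- every suffix of a chain is the chain of its first element
lemma pvChain_drop {v : Int} {l : List Int} (h : PvChain v l) :
    ∀ (i : Nat) (hi : i < l.length), PvChain l[i] (l.drop i) := by
  induction h with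
  | one =>
    intro i hi
    have h0 : i = 0 := by simp at hi; omega
    subst h0
    exact PvChain.one
  | @cons v l hne hc ih =>
    intro i hi
    cases i with
    | zero => exact PvChain.cons hne hc
    | succ k => simpa using ih k (by simpa using hi)

-- structure of a successful run of A's loop: the walked path plus the tail is a chain
lemma pvALoop_some {cache : PySem.Dict Int (List Int)} (hInv : PvInv cache) :
    ∀ (fuel : Nat) (current : Int) (acc p : List Int) (t : List Int),
      pvALoop cache current acc fuel = (p, some t) →
      ∃ w, p = acc ++ w ∧ PvChain current (w ++ t) := by
  intro fuel
  induction fuel with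
  | zero => intro current acc p t h; simp [pvALoop] at h
  | succ f ih =>
    intro current acc p t h
    cases hg : PySem.Dict.get? cache current with
    | some tail =>
      simp only [pvALoop, hg, Prod.mk.injEq, Option.some.injEq] at h
      obtain ⟨rfl, rfl⟩ := h
      exact ⟨[], by simp, by simpa using hInv.2 _ _ hg⟩
    | none =>
      have hne : current ≠ 1 := by
        intro hx; subst hx
        have h1 := hInv.1
        rw [hg] at h1
        simp at h1
      simp only [pvALoop, hg] at h
      obtain ⟨w, hw, hchain⟩ := ih (pvStep current) (acc ++ [current]) p t h
      exact ⟨current :: w, by simpa using hw, PvChain.cons hne hchain⟩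

lemma pvInv_insert {cache : PySem.Dict Int (List Int)} {v : Int} {l : List Int}
    (hInv : PvInv cache) (hchain : PvChain v l) (hv : v ≠ 1) :
    PvInv (PySem.Dict.insert cache v l) := by
  constructor
  · rw [PySem.Dict.get?_insert, if_neg (fun h => hv h.symm)]; exact hInv.1
  · intro v' l' h
    rw [PySem.Dict.get?_insert] at h
    split at h
    · rename_i hv'; cases h; subst hv'; exact hchain
    · exact hInv.2 _ _ h

-- the cache-population loop preserves the invariant
lemma pvInv_cacheUpd {max_number : Int} {seq path : List Int}
    {cache : PySem.Dict Int (List Int)} {start : Int}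
    (hInv : PvInv cache) (hchain : PvChain start seq) (hpre : path <+: seq) :
    PvInv (pvACacheUpd max_number seq cache path) := by
  unfold pvACacheUpd
  have hmem : ∀ q ∈ PySem.List.enumerate path 0,
      ∃ k : Nat, q.1 = (k : Int) ∧ k < seq.length ∧ seq[k]? = some q.2 := by
    intro q hq
    rw [PySem.List.mem_enumerate_iff] at hq
    obtain ⟨k, hk, rfl⟩ := hq
    obtain ⟨rest, rfl⟩ := hpre
    refine ⟨k, by simp, by simp; omega, ?_⟩
    simp [List.getElem?_append_left hk]
  generalize PySem.List.enumerate path 0 = es at hmem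
  induction es generalizing cache with
  | nil => simpa using hInv
  | cons q rest ihr =>
    simp only [List.foldl_cons]
    apply ihr
    · split
      · rename_i hcond
        obtain ⟨k, hk1, hk2, hk3⟩ := hmem q (by simp)
        have hv1 : q.2 ≠ 1 := by
          intro h1
          have := hInv.1
          rw [PySem.Dict.contains_eq_isSome_get?] at hcond
          rw [h1] at hcond
          rw [hcond.2] at this
          simp at this
        apply pvInv_insert hInv _ hv1
        rw [hk1, PySem.List.slice_from_natCast]
        have hval : seq[k] = q.2 := by
          rw [List.getElem?_eq_getElem hk2] at hk3
          exact Option.some.inj hk3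
        rw [← hval]
        exact pvChain_drop hchain k hk2
      · exact hInv
    · intro q' hq'; exact hmem q' (by simp [hq'])

-- the generator equality, folded over any list of starts, under the cache invariant
lemma pvGen_eq (max_number : Int) :
    ∀ (starts : List Int) (cache : PySem.Dict Int (List Int)) (out : List (Int × List Int)),
      PvInv cache →
      (starts.foldl (pvABody max_number) (cache, out)).2
        = out ++ starts.map
            (fun start => if start = 1 then ((1 : Int), ([1, 4, 2, 1] : List Int))
                          else (start, pvBLoop start [] pvFuel)) := by
  intro starts
  induction starts with
  | nil => intro cache out _; simp
  | cons s rest ih =>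
    intro cache out hInv
    rw [List.foldl_cons, List.map_cons]
    by_cases hs : s = 1
    · simp only [pvABody, if_pos hs]
      rw [ih _ _ hInv, hs]
      simp
    · simp only [pvABody, if_neg hs]
      cases hA : pvALoop cache s [] pvFuel with
      | mk p tOpt =>
        cases tOpt with
        | some t =>
          have hout : (p ++ t).take pvFuel = pvBLoop s [] pvFuel := by
            have h2 := pvEqLoop hInv pvFuel s []
            rw [hA] at h2
            simpa using h2
          obtain ⟨w, hw, hchain⟩ := pvALoop_some hInv pvFuel s [] p t hA
          have hpw : p = w := by simpa using hw
          subst hpw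
          rw [ih _ _ (pvInv_cacheUpd hInv hchain ⟨t, rfl⟩)]
          simp [hout]
        | none =>
          have hout : p = pvBLoop s [] pvFuel := by
            have h2 := pvEqLoop hInv pvFuel s []
            rw [hA] at h2
            simpa using h2
          rw [ih _ _ hInv]
          simp [hout]

lemma pvInv_init : PvInv (PySem.Dict.insert PySem.Dict.empty 1 [1]) := by
  constructor
  · simp [PySem.Dict.get?_insert_self]
  · intro v l h
    rw [PySem.Dict.get?_insert] at h
    split at h
    · rename_i hv; cases h; subst hv; exact PvChain.one
    · simp [PySem.Dict.get?_empty] at h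

-- ===== VERDICT (by name: the statement is the Claim_ definition above) =====
theorem collatz_sequences_spec : Claim_equal_collatz_sequences := by
  intro max_number _
  unfold Spec_collatz_sequences collatz_sequences collatz_sequences_alt
  rw [pvGen_eq max_number _ _ [] pvInv_init]
  simp
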